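-- pv_equiv track=rewrite | github.com/hexone2086/mae_pipe | rano.py | get_patch_indices_in_roi
-- ===== SOURCE A (Python) =====
-- def get_patch_indices_in_roi(roi):
--     x1, y1, w, h = roi
--     x2 = x1 + w
--     y2 = y1 + h
--     patch_indices_in_roi = []
--     patch_indices_outside_roi = []
--
--
--     for i in range(0, 224, 16):
--         for j in range(0, 224, 16):
--             if x1 <= j < x2 and y1 <= i < y2:
--                 patch_indices_in_roi.append((i // 16) * 14 + (j // 16))
--             else:
--                 patch_indices_outside_roi.append((i // 16) * 14 + (j // 16))
--
--     return patch_indices_in_roi, patch_indices_outside_roi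
-- ===== SOURCE B (Python) =====
-- def get_patch_indices_in_roi(roi):
--     x1, y1, w, h = roi
--     x2 = x1 + w
--     y2 = y1 + h
--     inside_cols = [c for c in range(14) if x1 <= c * 16 < x2]
--     inside_rows = [r for r in range(14) if y1 <= r * 16 < y2]
--     patch_indices_in_roi = [r * 14 + c for r in inside_rows for c in inside_cols]
--     inside = set(patch_indices_in_roi)
--     patch_indices_outside_roi = [idx for idx in range(196) if idx not in inside]
--     return patch_indices_in_roi, patch_indices_outside_roi
-- ===== Notes on version B (the rewrite author's own statement) =====
-- stated objective: alternative
-- what changed: Instead of a 14x14 per-cell predicate loop that appends each index to one of two lists, B computes the inside rows and columns separately (14+14 tests), builds the inside list as their product and the outside list as the set complement of range(196).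
import Mathlib
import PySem

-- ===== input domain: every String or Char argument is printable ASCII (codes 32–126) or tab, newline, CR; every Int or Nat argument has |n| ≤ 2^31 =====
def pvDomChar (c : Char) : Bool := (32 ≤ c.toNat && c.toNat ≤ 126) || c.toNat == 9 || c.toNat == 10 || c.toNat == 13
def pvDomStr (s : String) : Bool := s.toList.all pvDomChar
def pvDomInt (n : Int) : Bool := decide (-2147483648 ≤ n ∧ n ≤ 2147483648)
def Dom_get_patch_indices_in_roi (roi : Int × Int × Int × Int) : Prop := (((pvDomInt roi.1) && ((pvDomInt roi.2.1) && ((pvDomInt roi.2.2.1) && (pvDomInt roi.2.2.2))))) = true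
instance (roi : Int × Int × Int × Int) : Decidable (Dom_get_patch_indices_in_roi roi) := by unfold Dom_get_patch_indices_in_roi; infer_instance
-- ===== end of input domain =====

-- B replaces A's 196 per-cell inside/outside tests by 14 column tests and 14 row tests,
-- building the inside list as the row×column product and the outside list as the
-- set complement of range(196) (objective: alternative decomposition).

-- ===== PORT A =====
def get_patch_indices_in_roi (roi : Int × Int × Int × Int) : List Int × List Int :=
  let x1 := roi.1
  let y1 := roi.2.1
  let w := roi.2.2.1
  let h := roi.2.2.2
  let x2 := x1 + w
  let y2 := y1 + h
  (PySem.List.pyRange 0 224 16).foldl (fun acc i =>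
    (PySem.List.pyRange 0 224 16).foldl (fun acc j =>
      if x1 ≤ j ∧ j < x2 ∧ y1 ≤ i ∧ i < y2 then
        (acc.1 ++ [PySem.Int.floordiv i 16 * 14 + PySem.Int.floordiv j 16], acc.2)
      else
        (acc.1, acc.2 ++ [PySem.Int.floordiv i 16 * 14 + PySem.Int.floordiv j 16])) acc)
    ([], [])

-- ===== PORT B =====
def get_patch_indices_in_roi_alt (roi : Int × Int × Int × Int) : List Int × List Int :=
  let x1 := roi.1
  let y1 := roi.2.1
  let w := roi.2.2.1
  let h := roi.2.2.2
  let x2 := x1 + w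
  let y2 := y1 + h
  let insideCols := (PySem.List.pyRange 0 14 1).filter (fun c => decide (x1 ≤ c * 16 ∧ c * 16 < x2))
  let insideRows := (PySem.List.pyRange 0 14 1).filter (fun r => decide (y1 ≤ r * 16 ∧ r * 16 < y2))
  let inside := insideRows.flatMap (fun r => insideCols.map (fun c => r * 14 + c))
  let insideSet : PySem.Set Int := PySem.Set.ofList inside
  let outside := (PySem.List.pyRange 0 196 1).filter (fun idx => !(insideSet.contains idx))
  (inside, outside)

-- ===== PRECONDITION & SPEC =====
def Spec_get_patch_indices_in_roi (roi : Int × Int × Int × Int) (out : List Int × List Int) : Prop := out = get_patch_indices_in_roi_alt roi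
instance (roi : Int × Int × Int × Int) (out : List Int × List Int) : Decidable (Spec_get_patch_indices_in_roi roi out) := by unfold Spec_get_patch_indices_in_roi; infer_instance

-- ===== CLAIM (what is proved, stated in full; the proofs are below) =====
def Claim_equal_get_patch_indices_in_roi : Prop := ∀ (roi : Int × Int × Int × Int), Dom_get_patch_indices_in_roi roi → Spec_get_patch_indices_in_roi roi (get_patch_indices_in_roi roi)

-- ===== LEMMAS AND PROOFS =====

-- A's inner loop: each visited index is appended to exactly one component of the pair.
theorem pairFold (p : Int → Prop) [DecidablePred p] (g : Int → Int) (l : List Int)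
    (acc : List Int × List Int) :
    l.foldl (fun acc j => if p j then (acc.1 ++ [g j], acc.2) else (acc.1, acc.2 ++ [g j])) acc
      = (acc.1 ++ (l.filter (fun j => decide (p j))).map g,
         acc.2 ++ (l.filter (fun j => !decide (p j))).map g) := by
  induction l generalizing acc with
  | nil => simp
  | cons x t ih => by_cases hx : p x <;> simp [hx, ih]

-- A's outer loop: each row extends both components of the pair.
theorem pairFold2 (F G : Int → List Int) (l : List Int) (acc : List Int × List Int) :
    l.foldl (fun acc i => (acc.1 ++ F i, acc.2 ++ G i)) acc
      = (acc.1 ++ l.flatMap F, acc.2 ++ l.flatMap G) := by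
  induction l generalizing acc with
  | nil => simp
  | cons x t ih => simp [ih]

theorem flatMapFilter (p : Int → Bool) (f : Int → List Int) (l : List Int) :
    (l.filter p).flatMap f = l.flatMap (fun x => if p x then f x else []) := by
  induction l with
  | nil => simp
  | cons x t ih => by_cases hx : p x <;> simp [hx, ih]

theorem flatMapMap (f : Int → Int) (g : Int → List Int) (l : List Int) :
    (l.map f).flatMap g = l.flatMap (fun x => g (f x)) := by
  simp only [List.flatMap_def, List.map_map, Function.comp_def]

theorem range224 : PySem.List.pyRange 0 224 16 = (PySem.List.pyRange 0 14 1).map (fun k => k * 16) := by decide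

set_option maxRecDepth 8192 in
theorem range196 : PySem.List.pyRange 0 196 1
    = (PySem.List.pyRange 0 14 1).flatMap (fun r => (PySem.List.pyRange 0 14 1).map (fun c => r * 14 + c)) := by decide

theorem fd16 (k : Int) : PySem.Int.floordiv (k * 16) 16 = k := by
  rw [PySem.Int.floordiv_eq_ediv_of_pos (by norm_num)]
  exact Int.mul_ediv_cancel k (by norm_num)

-- membership in B's inside list, for row/col indices in range (r*14+c is injective there)
theorem mem_inside_iff (x1 x2 y1 y2 r c : Int)
    (hr : 0 ≤ r ∧ r < 14) (hc : 0 ≤ c ∧ c < 14) :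
    (r * 14 + c ∈
      (((PySem.List.pyRange 0 14 1).filter (fun r => decide (y1 ≤ r * 16 ∧ r * 16 < y2))).flatMap
        (fun r => ((PySem.List.pyRange 0 14 1).filter (fun c => decide (x1 ≤ c * 16 ∧ c * 16 < x2))).map
          (fun c => r * 14 + c))))
      ↔ ((y1 ≤ r * 16 ∧ r * 16 < y2) ∧ (x1 ≤ c * 16 ∧ c * 16 < x2)) := by
  simp only [List.mem_flatMap, List.mem_map, List.mem_filter, PySem.List.mem_pyRange_one,
    decide_eq_true_eq]
  constructor
  · rintro ⟨r', ⟨hr', hR⟩, c', ⟨⟨hc', hC⟩, heq⟩⟩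
    have : r' = r ∧ c' = c := by omega
    rcases this with ⟨rfl, rfl⟩
    exact ⟨hR, hC⟩
  · rintro ⟨hR, hC⟩
    exact ⟨r, ⟨hr, hR⟩, c, ⟨⟨hc, hC⟩, rfl⟩⟩

theorem main_eq (x1 y1 w h : Int) :
    get_patch_indices_in_roi (x1, y1, w, h) = get_patch_indices_in_roi_alt (x1, y1, w, h) := by
  unfold get_patch_indices_in_roi get_patch_indices_in_roi_alt
  simp only [pairFold, pairFold2, List.nil_append]
  rw [range224, range196]
  simp only [flatMapMap, List.filter_map, List.map_map, Function.comp_def, fd16,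
    flatMapFilter, List.filter_flatMap]
  refine Prod.ext ?_ ?_ <;> simp only <;>
    refine List.flatMap_congr fun r hr => ?_
  · by_cases hR : y1 ≤ r * 16 ∧ r * 16 < y1 + h
    · simp only [hR]
      refine congrArg _ (List.filter_congr fun c _ => ?_)
      exact decide_eq_decide.mpr (by tauto)
    · rw [decide_eq_false hR, if_neg (by simp)]
      rw [List.filter_congr (fun c _ => show _ = false by
        rw [decide_eq_false_iff_not]; omega)]
      simp
  · have hrb := (PySem.List.mem_pyRange_one).mp hr
    refine congrArg _ (List.filter_congr fun c hc => ?_)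
    have hcb := (PySem.List.mem_pyRange_one).mp hc
    have hm := mem_inside_iff x1 (x1+w) y1 (y1+h) r c (by omega) (by omega)
    rw [show ∀ X : List Int, (PySem.Set.ofList X).contains (r * 14 + c) = decide (r * 14 + c ∈ X)
      from fun X => by simp [pysem], ← flatMapFilter]
    exact congrArg Bool.not (decide_eq_decide.mpr (by rw [hm]; tauto))

-- ===== VERDICT (by name: the statement is the Claim_ definition above) =====
theorem get_patch_indices_in_roi_spec : Claim_equal_get_patch_indices_in_roi := by
  intro roi _
  obtain ⟨x1, y1, w, h⟩ := roi
  unfold Spec_get_patch_indices_in_roi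
  exact main_eq x1 y1 w h
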